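-- pv_equiv track=rewrite | github.com/backup1997/Python_DataStructure_Basic | chapter2/变位词.py | anagram1
-- ===== SOURCE A (Python) =====
-- def anagram1(s1, s2):
--     list_s2 = list(s2)
--     for pos1 in range(len(s1)):
--         flag = 0
--         for pos2 in range(len(s2)):  # 两重判断，保证找到就打勾并退出来，而不是一直循环
--             if s1[pos1] == list_s2[pos2]:
--                 flag = 1
--                 list_s2[pos2] = None
--                 break
--         if flag == 0:
--             return False
--     return True
-- ===== SOURCE B (Python) =====
-- def anagram1(s1, s2):
--     # count comparison: every character of s1 occurs at least as often in s2
--     return all(s1.count(ch) <= s2.count(ch) for ch in s1)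
-- ===== Notes on version B (the rewrite author's own statement) =====
-- stated objective: simpler
-- what changed: Replaces the consuming scan (mark matched slots of s2 with None, inner search per s1-char) by aggregate counting: one pass over s1 checking s1.count(ch) <= s2.count(ch), with no mutation and no marking.
import Mathlib
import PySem

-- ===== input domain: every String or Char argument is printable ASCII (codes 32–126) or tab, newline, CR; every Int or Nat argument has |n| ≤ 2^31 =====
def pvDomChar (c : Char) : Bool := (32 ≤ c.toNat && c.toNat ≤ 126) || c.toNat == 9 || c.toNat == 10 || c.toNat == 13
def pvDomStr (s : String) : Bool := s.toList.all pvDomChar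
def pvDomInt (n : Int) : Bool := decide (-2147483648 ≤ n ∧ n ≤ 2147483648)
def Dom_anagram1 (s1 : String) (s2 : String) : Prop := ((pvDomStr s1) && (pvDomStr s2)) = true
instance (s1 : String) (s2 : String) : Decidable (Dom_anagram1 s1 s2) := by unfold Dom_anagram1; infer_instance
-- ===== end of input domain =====

-- B replaces A's consuming scan (marking matched slots of s2 with None) by a per-character
-- count comparison over unchanged strings: simpler, no mutation. Proved equal everywhere.


-- ===== PORT A =====
-- inner 'for pos2' loop: find the first unmarked slot equal to c; mark it (set to none) and
-- break (flag = 1, i.e. 'some updated list'), or fall through with flag = 0 ('none')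
def anagram1Find (c : Char) : List (Option Char) → Option (List (Option Char))
  | [] => none
  | x :: xs =>
      if some c = x then some (none :: xs)
      else (anagram1Find c xs).map (fun ys => x :: ys)

-- outer 'for pos1' loop over the characters of s1, carrying the mutable list_s2
def anagram1Loop : List Char → List (Option Char) → Bool
  | [], _ => true
  | c :: rest, ls =>
      match anagram1Find c ls with
      | none => false          -- flag == 0: return False
      | some ls' => anagram1Loop rest ls'

def anagram1 (s1 : String) (s2 : String) : Bool :=
  anagram1Loop s1.toList (s2.toList.map some)

-- ===== PORT B =====
def anagram1_alt (s1 : String) (s2 : String) : Bool :=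
  s1.toList.all (fun ch =>
    PySem.List.count s1.toList ch ≤ PySem.List.count s2.toList ch)

-- ===== PRECONDITION & SPEC =====
def Spec_anagram1 (s1 : String) (s2 : String) (out : Bool) : Prop := out = anagram1_alt s1 s2
instance (s1 : String) (s2 : String) (out : Bool) : Decidable (Spec_anagram1 s1 s2 out) := by unfold Spec_anagram1; infer_instance

-- ===== CLAIM (what is proved, stated in full; the proofs are below) =====
def Claim_equal_anagram1 : Prop := ∀ (s1 : String) (s2 : String), Dom_anagram1 s1 s2 → Spec_anagram1 s1 s2 (anagram1 s1 s2)

-- ===== LEMMAS AND PROOFS =====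

theorem anagram1Find_none {c : Char} {ls : List (Option Char)}
    (h : anagram1Find c ls = none) : ls.count (some c) = 0 := by
  induction ls with
  | nil => simp
  | cons x xs ih =>
      simp only [anagram1Find] at h
      split at h
      · exact absurd h (by simp)
      · rename_i hne
        rw [Option.map_eq_none_iff] at h
        rw [List.count_cons_of_ne (fun h' => hne h'.symm)]
        exact ih h

theorem anagram1Find_some {c : Char} {ls ls' : List (Option Char)}
    (h : anagram1Find c ls = some ls') (d : Char) :
    ls.count (some d) = ls'.count (some d) + (if d = c then 1 else 0) := by
  induction ls generalizing ls' with
  | nil => simp [anagram1Find] at h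
  | cons x xs ih =>
      simp only [anagram1Find] at h
      split at h
      · rename_i hx
        cases h
        subst hx
        by_cases hdc : d = c
        · subst hdc
          rw [if_pos rfl, List.count_cons_self,
            List.count_cons_of_ne (by simp : (none : Option Char) ≠ some d)]
        · rw [if_neg hdc, List.count_cons_of_ne (by simpa using Ne.symm hdc),
            List.count_cons_of_ne (by simp : (none : Option Char) ≠ some d), Nat.add_zero]
      · rename_i hne
        rw [Option.map_eq_some_iff] at h
        obtain ⟨ys, hys, rfl⟩ := h
        by_cases hxd : x = some d
        · subst hxd
          rw [List.count_cons_self, List.count_cons_self, ih hys]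
          omega
        · rw [List.count_cons_of_ne hxd, List.count_cons_of_ne hxd]
          exact ih hys

theorem anagram1Loop_iff (l1 : List Char) (ls : List (Option Char)) :
    anagram1Loop l1 ls = true ↔ ∀ c, l1.count c ≤ ls.count (some c) := by
  induction l1 generalizing ls with
  | nil => simp [anagram1Loop]
  | cons c rest ih =>
      simp only [anagram1Loop]
      cases hf : anagram1Find c ls with
      | none =>
          simp only [Bool.false_eq_true, false_iff, not_forall, not_le]
          exact ⟨c, by simp [anagram1Find_none hf]⟩
      | some ls' =>
          rw [ih]
          constructor
          · intro h d
            have hls := anagram1Find_some hf d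
            have hd := h d
            by_cases hdc : d = c
            · subst hdc
              rw [List.count_cons_self]
              rw [if_pos rfl] at hls
              omega
            · rw [List.count_cons_of_ne (Ne.symm hdc)]
              rw [if_neg hdc, Nat.add_zero] at hls
              omega
          · intro h d
            have hls := anagram1Find_some hf d
            have hd := h d
            by_cases hdc : d = c
            · subst hdc
              rw [List.count_cons_self] at hd
              rw [if_pos rfl] at hls
              omega
            · rw [List.count_cons_of_ne (Ne.symm hdc)] at hd
              rw [if_neg hdc, Nat.add_zero] at hls
              omega

theorem count_map_some (l : List Char) (c : Char) :
    (l.map some).count (some c) = l.count c :=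
  List.count_map_of_injective l some (Option.some_injective Char) c

-- ===== VERDICT (by name: the statement is the Claim_ definition above) =====
theorem anagram1_spec : Claim_equal_anagram1 := by
  intro s1 s2 _
  unfold Spec_anagram1 anagram1 anagram1_alt
  rw [Bool.eq_iff_iff, anagram1Loop_iff, List.all_eq_true]
  simp only [count_map_some, PySem.List.count_eq, decide_eq_true_eq]
  constructor
  · intro h c _; exact h c
  · intro h c
    by_cases hc : c ∈ s1.toList
    · exact h c hc
    · simp [List.count_eq_zero_of_not_mem hc]
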